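-- pv_equiv track=rewrite | github.com/Vinay-Rai/code-and-debug-DSA-with-python | 12.Binary Tree/sol.py | solve
-- ===== SOURCE A (Python) =====
-- def solve(arr,k):
--     import copy
--     for i in range(len(arr)-k-1):
--         j=i
--         m=0
--         new_arr = copy.deepcopy(arr)
--         while m < k:
--             new_arr[j]=new_arr[j]*-1
--             new_ser = set(new_arr)
--             if len(new_ser)==1:
--                 return True
--             m+=1
--             j+=1
--     return False
-- ===== SOURCE B (Python) =====
-- def solve(arr, k):
--     # One pass over the run structure: after negating a contiguous block, all
--     # elements are equal iff the array is v..v (-v)..(-v) v..v (possibly with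
--     # empty outer parts) and the middle run fits in k, or the array is all zeros.
--     n = len(arr)
--     if n == 0 or k <= 0:
--         return False
--     u = arr[0]
--     if u == 0:
--         return all(x == 0 for x in arr)
--     i = 0
--     while i < n and arr[i] == u:
--         i += 1
--     if i == n:
--         return n <= k                      # all equal: negate the whole array
--     j = i
--     while j < n and arr[j] == -u:
--         j += 1
--     if j == n:
--         return i <= k or n - i <= k        # two runs: negate either one
--     if j - i > k:
--         return False
--     while j < n:
--         if arr[j] != u:
--             return False
--         j += 1
--     return True
-- ===== Notes on version B (the rewrite author's own statement) =====
-- stated objective: faster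
-- what changed: A tries every start position and flip length, deep-copying the array and rebuilding a set after every single negation; B makes one pass over the array's run structure (v-run, (-v)-run, v-run, or all zeros), so the nested flip-and-retest search disappears.
-- intended difference: On arrays that can be made constant only by negating a block starting at an index greater than len(arr)-k-2 (e.g. [1,-1] with k=1, or an all-equal array with n<=k), A returns False because its range(len(arr)-k-1) stops short of valid start positions; B returns True, the intended answer. — e.g. on solve([1, -1], 1): A returns false, B returns true
import Mathlib
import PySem

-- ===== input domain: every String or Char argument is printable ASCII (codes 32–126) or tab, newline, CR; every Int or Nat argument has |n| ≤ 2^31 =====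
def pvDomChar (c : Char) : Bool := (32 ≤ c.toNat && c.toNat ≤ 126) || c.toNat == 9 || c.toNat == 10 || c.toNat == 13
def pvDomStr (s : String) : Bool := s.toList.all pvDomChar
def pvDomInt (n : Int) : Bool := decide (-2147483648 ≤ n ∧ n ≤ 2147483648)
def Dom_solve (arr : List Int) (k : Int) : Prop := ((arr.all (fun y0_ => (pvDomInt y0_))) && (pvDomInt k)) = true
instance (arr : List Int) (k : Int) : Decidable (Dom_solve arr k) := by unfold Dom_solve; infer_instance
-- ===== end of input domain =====

-- B replaces A's nested negate-and-retest search by a single pass over the array's run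
-- structure (objective: faster). B intentionally also accepts equalizing blocks that start
-- late in the array, which A's loop bound misses — see D_solve below.

-- ===== PORT A =====
-- A's inner `while m < k` loop; fuel = number of remaining iterations (k - m cast to Nat).
-- The index j is in range on every iteration A actually performs, so List.getD/List.set
-- render new_arr[j] exactly there.
def solveInner (a : List Int) (j : Nat) : Nat → Bool
  | 0 => false
  | fuel+1 =>
    let a' := a.set j (-(a.getD j 0))
    if (PySem.Set.ofList a').length = 1 then true
    else solveInner a' (j+1) fuel

def solve (arr : List Int) (k : Int) : Bool :=
  (PySem.List.pyRange 0 ((arr.length : Int) - k - 1) 1).any fun i =>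
    solveInner arr i.toNat k.toNat

-- ===== PORT B =====
-- `while p < n and arr[p] == v: p += 1` — length of the leading run of v's.
def skipEq (v : Int) : List Int → Nat
  | [] => 0
  | x :: xs => if x = v then skipEq v xs + 1 else 0

def solve_alt (arr : List Int) (k : Int) : Bool :=
  if arr.length = 0 ∨ k ≤ 0 then false
  else
    let u := arr.headD 0
    if u = 0 then arr.all (fun x => x == 0)
    else
      let i := skipEq u arr
      if i = arr.length then decide ((arr.length : Int) ≤ k)   -- all equal: negate everything
      else
        let t := skipEq (-u) (arr.drop i)
        if i + t = arr.length then decide ((i : Int) ≤ k ∨ (arr.length : Int) - (i : Int) ≤ k)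
        else if (t : Int) > k then false
        else ((arr.drop i).drop t).all (fun x => x == u)

-- ===== PRECONDITION & SPEC =====
-- arr with the block of indices [i, i+t) negated
def flipSeg (arr : List Int) (i t : Nat) : List Int :=
  arr.mapIdx (fun idx x => if i ≤ idx ∧ idx < i + t then -x else x)

-- all elements equal (vacuously true for [])
def constList (l : List Int) : Prop := ∀ x ∈ l, x = l.headD 0

-- some contiguous block of length 1..k can be negated to make all elements equal
def ExFlip (arr : List Int) (k : Int) : Prop :=
  ∃ i ∈ List.range arr.length, ∃ t ∈ List.range (arr.length + 1),
    1 ≤ t ∧ (t : Int) ≤ k ∧ i + t ≤ arr.length ∧ constList (flipSeg arr i t)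

-- the same, but only blocks starting at an index ≤ len(arr)-k-2 (the starts A's loop tries)
def ExFlipEarly (arr : List Int) (k : Int) : Prop :=
  ∃ i ∈ List.range arr.length, ∃ t ∈ List.range (arr.length + 1),
    1 ≤ t ∧ (t : Int) ≤ k ∧ (i : Int) ≤ (arr.length : Int) - k - 2 ∧ constList (flipSeg arr i t)

-- On arrays that can be made constant only by negating a block starting at an index greater
-- than len(arr)-k-2 (e.g. [1,-1] with k=1, or an all-equal array with n ≤ k), A returns False
-- because its range(len(arr)-k-1) stops short of valid start positions; B returns True, the
-- intended answer.
def D_solve (arr : List Int) (k : Int) : Prop := ExFlip arr k ∧ ¬ ExFlipEarly arr k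
instance (arr : List Int) (k : Int) : Decidable (D_solve arr k) := by
  unfold D_solve ExFlip ExFlipEarly constList; infer_instance

def Spec_solve (arr : List Int) (k : Int) (out : Bool) : Prop := ¬ D_solve arr k → out = solve_alt arr k
instance (arr : List Int) (k : Int) (out : Bool) : Decidable (Spec_solve arr k out) := by
  unfold Spec_solve; infer_instance

def pvDiffWitness_solve : List Int × Int := ([1, -1], 1)
def pvDiffWitnessOut_solve : Bool × Bool := (false, true)

-- ===== CLAIM =====
def Claim_unchanged_solve : Prop := ∀ (arr : List Int) (k : Int), Dom_solve arr k → Spec_solve arr k (solve arr k)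
def Claim_changed_solve : Prop := Dom_solve (pvDiffWitness_solve.1) (pvDiffWitness_solve.2) ∧ D_solve (pvDiffWitness_solve.1) (pvDiffWitness_solve.2) ∧ solve (pvDiffWitness_solve.1) (pvDiffWitness_solve.2) = pvDiffWitnessOut_solve.1 ∧ solve_alt (pvDiffWitness_solve.1) (pvDiffWitness_solve.2) = pvDiffWitnessOut_solve.2 ∧ pvDiffWitnessOut_solve.1 ≠ pvDiffWitnessOut_solve.2
def Claim_exact_solve : Prop := ∀ (arr : List Int) (k : Int), Dom_solve arr k → D_solve arr k → solve arr k ≠ solve_alt arr k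

-- ===== LEMMAS AND PROOFS =====

-- "all elements equal (and the list is nonempty)" — what len(set(l)) == 1 says
def AllSame (l : List Int) : Prop := ∃ v, l ≠ [] ∧ ∀ x ∈ l, x = v

-- pointwise normal form: constant v outside the block [i, i+t), constant -v inside
def PtF (arr : List Int) (i t : Nat) (v : Int) : Prop :=
  ∀ idx, idx < arr.length → arr[idx]? = some (if i ≤ idx ∧ idx < i + t then -v else v)

theorem length_flip (arr : List Int) (i t : Nat) : (flipSeg arr i t).length = arr.length := by
  simp [flipSeg]

theorem getElem_flipSeg (arr : List Int) (i t idx : Nat) (h : idx < (flipSeg arr i t).length) :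
    (flipSeg arr i t)[idx] =
      if i ≤ idx ∧ idx < i + t then -(arr[idx]'(by simpa [length_flip] using h))
      else arr[idx]'(by simpa [length_flip] using h) := by
  simp [flipSeg]

theorem nodup_allsame (v : Int) (s : List Int) (hd : s.Nodup) (ha : ∀ x ∈ s, x = v)
    (hv : v ∈ s) : s = [v] := by
  cases s with
  | nil => cases hv
  | cons a t =>
    have hav : a = v := ha a (by simp)
    have ht : t = [] := by
      rw [List.eq_nil_iff_forall_not_mem]
      intro y hy
      have : y = v := ha y (by simp [hy])
      subst this hav
      exact (List.nodup_cons.mp hd).1 hy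
    simp [hav, ht]

theorem ofList_len_one (l : List Int) :
    (PySem.Set.ofList l).length = 1 ↔ AllSame l := by
  constructor
  · intro h
    obtain ⟨a, ha⟩ := List.length_eq_one_iff.mp h
    refine ⟨a, ?_, ?_⟩
    · rintro rfl
      simp [PySem.Set.ofList, PySem.Set.empty] at ha
    · intro x hx
      have : x ∈ PySem.Set.ofList l := (PySem.Set.mem_ofList l x).mpr hx
      rw [ha] at this
      simpa using this
  · rintro ⟨v, hne, hall⟩
    have hv : v ∈ l := by
      cases l with
      | nil => exact absurd rfl hne
      | cons a t => have := hall a (by simp); simp [this]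
    have : PySem.Set.ofList l = [v] := by
      refine nodup_allsame v _ (PySem.Set.nodup_ofList l) ?_ ?_
      · intro x hx
        exact hall x ((PySem.Set.mem_ofList l x).mp hx)
      · exact (PySem.Set.mem_ofList l v).mpr hv
    simp [this]

theorem flipSeg_zero (a : List Int) (j : Nat) : flipSeg a j 0 = a := by
  apply List.ext_getElem (by simp [flipSeg])
  intro n h1 h2
  rw [getElem_flipSeg, if_neg (by omega)]

theorem flip_succ (a : List Int) (j t : Nat) :
    flipSeg (a.set j (-(a.getD j 0))) (j+1) t = flipSeg a j (t+1) := by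
  apply List.ext_getElem (by simp [flipSeg])
  intro n h1 h2
  rw [getElem_flipSeg, getElem_flipSeg]
  have hn : n < a.length := by simpa [flipSeg] using h2
  by_cases hj : j = n
  · subst hj
    rw [if_neg (by omega), if_pos (by omega)]
    rw [List.getElem_set_self, List.getD_eq_getElem a 0 hn]
  · by_cases hin : j + 1 ≤ n ∧ n < j + 1 + t
    · rw [if_pos hin, if_pos (by omega), List.getElem_set_ne hj]
    · rw [if_neg hin, if_neg (by omega), List.getElem_set_ne hj]

theorem solveInner_iff (fuel : Nat) (a : List Int) (j : Nat) :
    solveInner a j fuel = true ↔ ∃ t, 1 ≤ t ∧ t ≤ fuel ∧ AllSame (flipSeg a j t) := by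
  induction fuel generalizing a j with
  | zero =>
    simp only [solveInner]
    constructor
    · intro h; cases h
    · rintro ⟨t, h1, h2, -⟩; omega
  | succ fuel ih =>
    have ha1 : a.set j (-(a.getD j 0)) = flipSeg a j 1 := by
      rw [← flip_succ a j 0, flipSeg_zero]
    simp only [solveInner]
    by_cases hc : (PySem.Set.ofList (a.set j (-(a.getD j 0)))).length = 1
    · rw [if_pos hc]
      simp only [true_iff]
      refine ⟨1, le_refl 1, by omega, ?_⟩
      rw [← ha1]
      exact (ofList_len_one _).mp hc
    · rw [if_neg hc, ih]
      constructor
      · rintro ⟨t, h1, h2, h3⟩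
        rw [flip_succ] at h3
        exact ⟨t + 1, by omega, by omega, h3⟩
      · rintro ⟨t, h1, h2, h3⟩
        rcases Nat.lt_or_ge t 2 with h | h
        · exfalso
          have ht : t = 1 := by omega
          subst ht
          rw [← ha1] at h3
          exact hc ((ofList_len_one _).mpr h3)
        · refine ⟨t - 1, by omega, by omega, ?_⟩
          rw [flip_succ]
          have : t - 1 + 1 = t := by omega
          rw [this]
          exact h3

theorem solve_iff (arr : List Int) (k : Int) :
    solve arr k = true ↔
      ∃ i : Int, 0 ≤ i ∧ i < (arr.length : Int) - k - 1 ∧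
        ∃ t, 1 ≤ t ∧ t ≤ k.toNat ∧ AllSame (flipSeg arr i.toNat t) := by
  simp only [solve, List.any_eq_true, PySem.List.mem_pyRange_one, solveInner_iff]
  constructor
  · rintro ⟨i, ⟨h1, h2⟩, h3⟩; exact ⟨i, h1, h2, h3⟩
  · rintro ⟨i, h1, h2, h3⟩; exact ⟨i, ⟨h1, h2⟩, h3⟩

theorem skipEq_le (v : Int) (l : List Int) : skipEq v l ≤ l.length := by
  induction l with
  | nil => simp [skipEq]
  | cons x xs ih => simp only [skipEq, List.length_cons]; split <;> omega

theorem getElem?_skipEq_ne (v : Int) (l : List Int) :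
    skipEq v l < l.length → l[skipEq v l]? ≠ some v := by
  induction l with
  | nil => simp
  | cons x xs ih =>
    intro h
    by_cases hx : x = v
    · simpa [skipEq, hx] using ih (by simpa [skipEq, hx] using h)
    · simp [skipEq, hx]

theorem skipEq_lt_getElem? (v : Int) (l : List Int) (idx : Nat) (h : idx < skipEq v l) :
    l[idx]? = some v := by
  induction l generalizing idx with
  | nil => simp [skipEq] at h
  | cons x xs ih =>
    simp only [skipEq] at h
    by_cases hx : x = v
    · rw [if_pos hx] at h
      cases idx with
      | zero => simpa using hx
      | succ m => simpa using ih m (by omega)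
    · rw [if_neg hx] at h; omega

theorem flip_all_eq' (arr : List Int) (i t : Nat) (w : Int)
    (hall : ∀ x ∈ flipSeg arr i t, x = w) (idx : Nat) (h : idx < arr.length) :
    arr[idx]? = some (if i ≤ idx ∧ idx < i + t then -w else w) := by
  have h2 : idx < (flipSeg arr i t).length := by rwa [length_flip]
  have hx := (List.forall_mem_iff_forall_getElem).mp hall idx h2
  rw [getElem_flipSeg] at hx
  rw [List.getElem?_eq_getElem h]
  split_ifs at hx ⊢ with hb
  · rw [← hx]
    simp
  · rw [← hx]

theorem all_eq_flip' (arr : List Int) (i t : Nat) (w : Int)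
    (h : ∀ idx, idx < arr.length → arr[idx]? = some (if i ≤ idx ∧ idx < i + t then -w else w)) :
    ∀ x ∈ flipSeg arr i t, x = w := by
  rw [List.forall_mem_iff_forall_getElem]
  intro idx hidx
  have hl : idx < arr.length := by rwa [length_flip] at hidx
  rw [getElem_flipSeg]
  have h9 := h idx hl
  rw [List.getElem?_eq_getElem hl] at h9
  have h9' := Option.some.inj h9
  split_ifs at h9' ⊢ with hb
  · omega
  · exact h9'

theorem headD_getElem? (l : List Int) (h : l ≠ []) : l[0]? = some (l.headD 0) := by
  cases l with
  | nil => exact absurd rfl h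
  | cons a t => simp

theorem one_le_skipEq (l : List Int) (v : Int) (h : l[0]? = some v) : 1 ≤ skipEq v l := by
  cases l with
  | nil => simp at h
  | cons a t =>
    have : a = v := by simpa using h
    simp [skipEq, this]

theorem ptf_of_constList (arr : List Int) (i t : Nat) (h : constList (flipSeg arr i t)) :
    PtF arr i t ((flipSeg arr i t).headD 0) :=
  fun idx hh => flip_all_eq' arr i t _ h idx hh

theorem constList_of_ptf (arr : List Int) (i t : Nat) (v : Int) (h : PtF arr i t v) :
    constList (flipSeg arr i t) := by
  have hall := all_eq_flip' arr i t v (fun idx hh => h idx hh)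
  intro x hx
  have hxv := hall x hx
  have hhead : (flipSeg arr i t).headD 0 = v := by
    cases hfl : flipSeg arr i t with
    | nil => rw [hfl] at hx; cases hx
    | cons a tl =>
      have := hall a (by rw [hfl]; exact List.mem_cons_self)
      simp [this]
  rw [hxv, hhead]

theorem allsame_iff (arr : List Int) (i t : Nat) :
    AllSame (flipSeg arr i t) ↔ arr ≠ [] ∧ ∃ v, PtF arr i t v := by
  constructor
  · rintro ⟨v, hne, hall⟩
    have harr : arr ≠ [] := by
      intro hc
      exact hne (by simp [hc, flipSeg])
    exact ⟨harr, v, fun idx hh => flip_all_eq' arr i t v hall idx hh⟩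
  · rintro ⟨hne, v, hpt⟩
    refine ⟨v, ?_, all_eq_flip' arr i t v hpt⟩
    intro hc
    have := congrArg List.length hc
    rw [length_flip] at this
    simp only [List.length_nil] at this
    exact hne (List.eq_nil_of_length_eq_zero this)

theorem exflip_iff (arr : List Int) (k : Int) :
    ExFlip arr k ↔ ∃ (i t : Nat) (v : Int), 1 ≤ t ∧ (t : Int) ≤ k ∧ i + t ≤ arr.length ∧ PtF arr i t v := by
  unfold ExFlip
  constructor
  · rintro ⟨i, hm, t, hmt, h1, h2, h3, hc⟩
    exact ⟨i, t, _, h1, h2, h3, ptf_of_constList arr i t hc⟩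
  · rintro ⟨i, t, v, h1, h2, h3, hpt⟩
    exact ⟨i, List.mem_range.mpr (by omega), t, List.mem_range.mpr (by omega),
      h1, h2, h3, constList_of_ptf arr i t v hpt⟩

theorem exflipearly_iff (arr : List Int) (k : Int) :
    ExFlipEarly arr k ↔
      ∃ (i t : Nat) (v : Int), 1 ≤ t ∧ (t : Int) ≤ k ∧ (i : Int) ≤ (arr.length : Int) - k - 2 ∧ PtF arr i t v := by
  unfold ExFlipEarly
  constructor
  · rintro ⟨i, hm, t, hmt, h1, h2, h3, hc⟩
    exact ⟨i, t, _, h1, h2, h3, ptf_of_constList arr i t hc⟩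
  · rintro ⟨i, t, v, h1, h2, h3, hpt⟩
    have hk1 : 1 ≤ k := by omega
    exact ⟨i, List.mem_range.mpr (by omega), t, List.mem_range.mpr (by omega),
      h1, h2, h3, constList_of_ptf arr i t v hpt⟩

theorem solveA_iff (arr : List Int) (k : Int) : solve arr k = true ↔ ExFlipEarly arr k := by
  rw [solve_iff, exflipearly_iff]
  constructor
  · rintro ⟨i, hi0, hi1, t, ht1, ht2, hAS⟩
    obtain ⟨hne, v, hpt⟩ := (allsame_iff arr i.toNat t).mp hAS
    exact ⟨i.toNat, t, v, ht1, by omega, by omega, hpt⟩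
  · rintro ⟨i, t, v, h1, h2, h3, hpt⟩
    have hne : arr ≠ [] := List.ne_nil_of_length_pos (by omega)
    refine ⟨(i : Int), by omega, by omega, t, h1, by omega, ?_⟩
    rw [Int.toNat_natCast]
    exact (allsame_iff arr i t).mpr ⟨hne, v, hpt⟩

theorem early_to_flip (arr : List Int) (k : Int) (h : ExFlipEarly arr k) : ExFlip arr k := by
  rw [exflipearly_iff] at h
  rw [exflip_iff]
  obtain ⟨i, t, v, h1, h2, h3, hpt⟩ := h
  exact ⟨i, t, v, h1, h2, by omega, hpt⟩

theorem alt_iff (arr : List Int) (k : Int) : solve_alt arr k = true ↔ ExFlip arr k := by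
  rw [exflip_iff]
  simp only [solve_alt]
  by_cases hnk : arr.length = 0 ∨ k ≤ 0
  · rw [if_pos hnk]
    simp only [Bool.false_eq_true, false_iff, not_exists]
    rintro i t v ⟨h1, h2, h3, -⟩
    rcases hnk with h | h <;> omega
  rw [if_neg hnk]
  push Not at hnk
  obtain ⟨hn0, hk0⟩ := hnk
  have hn1 : 1 ≤ arr.length := by omega
  have hk1 : 1 ≤ k := by omega
  have hne : arr ≠ [] := List.ne_nil_of_length_pos (by omega)
  have h0 : arr[0]? = some (arr.headD 0) := headD_getElem? arr hne
  by_cases hu : arr.headD 0 = 0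
  · rw [if_pos hu]
    rw [hu] at h0
    simp only [List.all_eq_true, beq_iff_eq]
    constructor
    · intro hall
      refine ⟨0, 1, 0, le_refl 1, by omega, by omega, ?_⟩
      intro idx hidx
      rw [List.getElem?_eq_getElem hidx]
      have : arr[idx] = 0 := hall _ (List.getElem_mem hidx)
      rw [this]
      split_ifs <;> simp
    · rintro ⟨i, t, v, h1, h2, h3, hpt⟩
      have hv0 : v = 0 := by
        have := hpt 0 (by omega)
        rw [h0] at this
        have := Option.some.inj this
        split_ifs at this <;> omega
      intro x hx
      obtain ⟨idx, hidx, rfl⟩ := List.mem_iff_getElem.mp hx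
      have := hpt idx hidx
      rw [List.getElem?_eq_getElem hidx] at this
      have := Option.some.inj this
      split_ifs at this <;> omega
  rw [if_neg hu]
  have hi0ge1 : 1 ≤ skipEq (arr.headD 0) arr := one_le_skipEq arr _ h0
  have hi0le : skipEq (arr.headD 0) arr ≤ arr.length := skipEq_le _ arr
  have hu_lt : ∀ idx, idx < skipEq (arr.headD 0) arr → arr[idx]? = some (arr.headD 0) :=
    skipEq_lt_getElem? _ arr
  by_cases hA : skipEq (arr.headD 0) arr = arr.length
  · rw [if_pos hA]
    have hall : ∀ idx, idx < arr.length → arr[idx]? = some (arr.headD 0) := by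
      intro idx hidx; exact hu_lt idx (by omega)
    simp only [decide_eq_true_eq]
    constructor
    · intro hnk
      refine ⟨0, arr.length, -(arr.headD 0), by omega, by omega, by omega, ?_⟩
      intro idx hidx
      rw [if_pos (by omega), hall idx hidx]
      simp
    · rintro ⟨i, t, v, h1, h2, h3, hpt⟩
      by_cases hi : i = 0
      · subst hi
        have hv : -v = arr.headD 0 := by
          have := hpt 0 (by omega)
          rw [h0] at this
          have := Option.some.inj this
          rw [if_pos (by omega)] at this
          omega
        have htn : t = arr.length := by
          by_contra hc
          have hlt : t < arr.length := by omega
          have := hpt t hlt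
          rw [hall t hlt] at this
          have := Option.some.inj this
          rw [if_neg (by omega)] at this
          omega
        omega
      · exfalso
        have hv : v = arr.headD 0 := by
          have := hpt 0 (by omega)
          rw [h0] at this
          have := Option.some.inj this
          rw [if_neg (by omega)] at this
          omega
        have hiL : i < arr.length := by omega
        have := hpt i hiL
        rw [hall i hiL] at this
        have := Option.some.inj this
        rw [if_pos (by omega)] at this
        omega
  · rw [if_neg hA]
    have hi0lt : skipEq (arr.headD 0) arr < arr.length := by omega
    have hi0ne : arr[skipEq (arr.headD 0) arr]? ≠ some (arr.headD 0) :=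
      getElem?_skipEq_ne _ arr hi0lt
    have hdroplen : (arr.drop (skipEq (arr.headD 0) arr)).length =
        arr.length - skipEq (arr.headD 0) arr := by simp
    have ht0le : skipEq (-(arr.headD 0)) (arr.drop (skipEq (arr.headD 0) arr)) ≤
        arr.length - skipEq (arr.headD 0) arr := by
      have := skipEq_le (-(arr.headD 0)) (arr.drop (skipEq (arr.headD 0) arr))
      omega
    have hmid : ∀ p, p < skipEq (-(arr.headD 0)) (arr.drop (skipEq (arr.headD 0) arr)) →
        arr[skipEq (arr.headD 0) arr + p]? = some (-(arr.headD 0)) := by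
      intro p hp
      have := skipEq_lt_getElem? (-(arr.headD 0)) (arr.drop (skipEq (arr.headD 0) arr)) p hp
      rwa [List.getElem?_drop] at this
    by_cases hB : skipEq (arr.headD 0) arr +
        skipEq (-(arr.headD 0)) (arr.drop (skipEq (arr.headD 0) arr)) = arr.length
    · rw [if_pos hB]
      simp only [decide_eq_true_eq]
      constructor
      · rintro (hc | hc)
        · refine ⟨0, skipEq (arr.headD 0) arr, -(arr.headD 0), by omega, by omega, by omega, ?_⟩
          intro idx hidx
          by_cases hcase : idx < skipEq (arr.headD 0) arr
          · rw [if_pos (by omega), hu_lt idx hcase]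
            simp
          · rw [if_neg (by omega)]
            have := hmid (idx - skipEq (arr.headD 0) arr) (by omega)
            rwa [show skipEq (arr.headD 0) arr + (idx - skipEq (arr.headD 0) arr) = idx
              by omega] at this
        · refine ⟨skipEq (arr.headD 0) arr,
            skipEq (-(arr.headD 0)) (arr.drop (skipEq (arr.headD 0) arr)), arr.headD 0,
            by omega, by omega, by omega, ?_⟩
          intro idx hidx
          by_cases hcase : idx < skipEq (arr.headD 0) arr
          · rw [if_neg (by omega)]
            exact hu_lt idx hcase
          · rw [if_pos (by omega)]
            have := hmid (idx - skipEq (arr.headD 0) arr) (by omega)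
            rwa [show skipEq (arr.headD 0) arr + (idx - skipEq (arr.headD 0) arr) = idx
              by omega] at this
      · rintro ⟨i, t, v, h1, h2, h3, hpt⟩
        by_cases hi : i = 0
        · subst hi
          left
          have hv : -v = arr.headD 0 := by
            have := hpt 0 (by omega)
            rw [h0] at this
            have := Option.some.inj this
            rw [if_pos (by omega)] at this
            omega
          have hti0 : t = skipEq (arr.headD 0) arr := by
            rcases Nat.lt_trichotomy t (skipEq (arr.headD 0) arr) with hc | hc | hc
            · exfalso
              have := hpt t (by omega)
              rw [hu_lt t hc] at this
              have := Option.some.inj this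
              rw [if_neg (by omega)] at this
              omega
            · exact hc
            · exfalso
              have := hpt (skipEq (arr.headD 0) arr) hi0lt
              rw [if_pos (by omega)] at this
              apply hi0ne
              rw [this, hv]
          omega
        · right
          have hv : v = arr.headD 0 := by
            have := hpt 0 (by omega)
            rw [h0] at this
            have := Option.some.inj this
            rw [if_neg (by omega)] at this
            omega
          have hii0 : i = skipEq (arr.headD 0) arr := by
            rcases Nat.lt_trichotomy i (skipEq (arr.headD 0) arr) with hc | hc | hc
            · exfalso
              have := hpt i (by omega)
              rw [hu_lt i hc] at this
              have := Option.some.inj this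
              rw [if_pos (by omega)] at this
              omega
            · exact hc
            · exfalso
              have := hpt (skipEq (arr.headD 0) arr) hi0lt
              rw [if_neg (by omega)] at this
              exact hi0ne (by rw [this, hv])
          have hend : i + t = arr.length := by
            by_contra hc
            have hlt : i + t < arr.length := by omega
            have := hpt (i + t) hlt
            rw [if_neg (by omega)] at this
            have := hmid (i + t - skipEq (arr.headD 0) arr) (by omega)
            rw [show skipEq (arr.headD 0) arr + (i + t - skipEq (arr.headD 0) arr) = i + t
              by omega] at this
            have h9 := hpt (i + t) hlt
            rw [if_neg (by omega), this] at h9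
            have := Option.some.inj h9
            omega
          omega
    · rw [if_neg hB]
      have hj0lt : skipEq (arr.headD 0) arr +
          skipEq (-(arr.headD 0)) (arr.drop (skipEq (arr.headD 0) arr)) < arr.length := by omega
      have hj0ne : arr[skipEq (arr.headD 0) arr +
          skipEq (-(arr.headD 0)) (arr.drop (skipEq (arr.headD 0) arr))]? ≠
          some (-(arr.headD 0)) := by
        have := getElem?_skipEq_ne (-(arr.headD 0)) (arr.drop (skipEq (arr.headD 0) arr))
          (by omega)
        rwa [List.getElem?_drop] at this
      -- any witness must be the block [i0, i0+t0)
      have hwit : ∀ (i t : Nat) (v : Int), 1 ≤ t → (t : Int) ≤ k → i + t ≤ arr.length → PtF arr i t v →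
          i = skipEq (arr.headD 0) arr ∧
          t = skipEq (-(arr.headD 0)) (arr.drop (skipEq (arr.headD 0) arr)) ∧
          v = arr.headD 0 := by
        intro i t v h1 h2 h3 hpt
        by_cases hi : i = 0
        · exfalso
          subst hi
          have hv : -v = arr.headD 0 := by
            have := hpt 0 (by omega)
            rw [h0] at this
            have := Option.some.inj this
            rw [if_pos (by omega)] at this
            omega
          have hti0 : t = skipEq (arr.headD 0) arr := by
            rcases Nat.lt_trichotomy t (skipEq (arr.headD 0) arr) with hc | hc | hc
            · exfalso
              have := hpt t (by omega)
              rw [hu_lt t hc] at this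
              have := Option.some.inj this
              rw [if_neg (by omega)] at this
              omega
            · exact hc
            · exfalso
              have := hpt (skipEq (arr.headD 0) arr) hi0lt
              rw [if_pos (by omega)] at this
              apply hi0ne
              rw [this, hv]
          -- all positions ≥ t are v = -(headD); contradicts hj0ne
          apply hj0ne
          have h9 := hpt (skipEq (arr.headD 0) arr +
            skipEq (-(arr.headD 0)) (arr.drop (skipEq (arr.headD 0) arr))) hj0lt
          rw [if_neg (by omega)] at h9
          rw [h9]
          congr 1
          omega
        · have hv : v = arr.headD 0 := by
            have := hpt 0 (by omega)
            rw [h0] at this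
            have := Option.some.inj this
            rw [if_neg (by omega)] at this
            omega
          have hii0 : i = skipEq (arr.headD 0) arr := by
            rcases Nat.lt_trichotomy i (skipEq (arr.headD 0) arr) with hc | hc | hc
            · exfalso
              have := hpt i (by omega)
              rw [hu_lt i hc] at this
              have := Option.some.inj this
              rw [if_pos (by omega)] at this
              omega
            · exact hc
            · exfalso
              have := hpt (skipEq (arr.headD 0) arr) hi0lt
              rw [if_neg (by omega)] at this
              exact hi0ne (by rw [this, hv])
          have htt0 : t = skipEq (-(arr.headD 0)) (arr.drop (skipEq (arr.headD 0) arr)) := by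
            rcases Nat.lt_trichotomy t
              (skipEq (-(arr.headD 0)) (arr.drop (skipEq (arr.headD 0) arr))) with hc | hc | hc
            · exfalso
              have h9 := hpt (i + t) (by omega)
              rw [if_neg (by omega)] at h9
              have h10 := hmid t hc
              rw [← hii0, h9] at h10
              have := Option.some.inj h10
              omega
            · exact hc
            · exfalso
              apply hj0ne
              have h9 := hpt (skipEq (arr.headD 0) arr +
                skipEq (-(arr.headD 0)) (arr.drop (skipEq (arr.headD 0) arr))) hj0lt
              rw [if_pos (by omega)] at h9
              rw [h9, hv]
          exact ⟨hii0, htt0, hv⟩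
      by_cases ht : (skipEq (-(arr.headD 0)) (arr.drop (skipEq (arr.headD 0) arr)) : Int) > k
      · rw [if_pos ht]
        simp only [Bool.false_eq_true, false_iff, not_exists]
        rintro i t v ⟨h1, h2, h3, hpt⟩
        obtain ⟨-, rfl, -⟩ := hwit i t v h1 h2 h3 hpt
        omega
      · rw [if_neg ht]
        simp only [List.all_eq_true, beq_iff_eq]
        constructor
        · intro hall
          have hrest : ∀ idx, skipEq (arr.headD 0) arr +
              skipEq (-(arr.headD 0)) (arr.drop (skipEq (arr.headD 0) arr)) ≤ idx →
              idx < arr.length → arr[idx]? = some (arr.headD 0) := by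
            intro idx hge hlt
            have hp : idx - skipEq (arr.headD 0) arr -
                skipEq (-(arr.headD 0)) (arr.drop (skipEq (arr.headD 0) arr)) <
                ((arr.drop (skipEq (arr.headD 0) arr)).drop
                  (skipEq (-(arr.headD 0)) (arr.drop (skipEq (arr.headD 0) arr)))).length := by
              simp only [List.length_drop]
              omega
            have h9 := hall _ (List.getElem_mem hp)
            have h10 := List.getElem?_eq_getElem hp
            rw [h9, List.getElem?_drop, List.getElem?_drop] at h10
            rw [show skipEq (arr.headD 0) arr +
                (skipEq (-(arr.headD 0)) (arr.drop (skipEq (arr.headD 0) arr)) +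
                (idx - skipEq (arr.headD 0) arr -
                  skipEq (-(arr.headD 0)) (arr.drop (skipEq (arr.headD 0) arr)))) = idx
              by omega] at h10
            exact h10
          have ht0ge1 : 1 ≤ skipEq (-(arr.headD 0)) (arr.drop (skipEq (arr.headD 0) arr)) := by
            by_contra hc
            have h00 : skipEq (-(arr.headD 0)) (arr.drop (skipEq (arr.headD 0) arr)) = 0 := by
              omega
            exact hi0ne (hrest (skipEq (arr.headD 0) arr) (by omega) hi0lt)
          refine ⟨skipEq (arr.headD 0) arr,
            skipEq (-(arr.headD 0)) (arr.drop (skipEq (arr.headD 0) arr)), arr.headD 0,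
            ht0ge1, by omega, by omega, ?_⟩
          intro idx hidx
          by_cases hc1 : idx < skipEq (arr.headD 0) arr
          · rw [if_neg (by omega)]
            exact hu_lt idx hc1
          · by_cases hc2 : idx < skipEq (arr.headD 0) arr +
                skipEq (-(arr.headD 0)) (arr.drop (skipEq (arr.headD 0) arr))
            · rw [if_pos (by omega)]
              have := hmid (idx - skipEq (arr.headD 0) arr) (by omega)
              rwa [show skipEq (arr.headD 0) arr + (idx - skipEq (arr.headD 0) arr) = idx
                by omega] at this
            · rw [if_neg (by omega)]
              exact hrest idx (by omega) hidx
        · rintro ⟨i, t, v, h1, h2, h3, hpt⟩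
          obtain ⟨rfl, rfl, rfl⟩ := hwit i t v h1 h2 h3 hpt
          intro x hx
          obtain ⟨p, hp, rfl⟩ := List.mem_iff_getElem.mp hx
          have hplen : p < arr.length - (skipEq (arr.headD 0) arr +
              skipEq (-(arr.headD 0)) (arr.drop (skipEq (arr.headD 0) arr))) := by
            simpa [List.length_drop] using hp
          have h10 := List.getElem?_eq_getElem hp
          rw [List.getElem?_drop, List.getElem?_drop] at h10
          have h9 := hpt (skipEq (arr.headD 0) arr +
            (skipEq (-(arr.headD 0)) (arr.drop (skipEq (arr.headD 0) arr)) + p)) (by omega)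
          rw [if_neg (by omega)] at h9
          rw [h9] at h10
          exact (Option.some.inj h10).symm

-- ===== VERDICT =====
theorem solve_spec : Claim_unchanged_solve := by
  intro arr k _ hnD
  by_cases hE : ExFlipEarly arr k
  · rw [(solveA_iff arr k).mpr hE, (alt_iff arr k).mpr (early_to_flip arr k hE)]
  · have hs : solve arr k = false := by
      rw [← Bool.not_eq_true]
      intro hh
      exact hE ((solveA_iff arr k).mp hh)
    by_cases hF : ExFlip arr k
    · exact absurd ⟨hF, hE⟩ hnD
    · have ha : solve_alt arr k = false := by
        rw [← Bool.not_eq_true]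
        intro hh
        exact hF ((alt_iff arr k).mp hh)
      rw [hs, ha]

theorem solve_changed : Claim_changed_solve := by unfold Claim_changed_solve; decide

theorem solve_tight : Claim_exact_solve := by
  intro arr k _ hD
  obtain ⟨hF, hE⟩ := hD
  have hs : solve arr k = false := by
    rw [← Bool.not_eq_true]
    intro hh
    exact hE ((solveA_iff arr k).mp hh)
  rw [hs, (alt_iff arr k).mpr hF]
  simp
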